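-- pv_equiv track=rewrite | github.com/Wulfic/Cicada3301 | tools/archive/compare_page1_keys.py | generate_frequency_key_sub
-- ===== SOURCE A (Python) =====
-- from collections import Counter
--
-- def generate_frequency_key_sub(cipher_indices, key_length):
--     """Generate frequency-based key for SUB"""
--     key = []
--     for i in range(key_length):
--         coset = [cipher_indices[j] for j in range(i, len(cipher_indices), key_length)]
--         if not coset:
--             key.append(0)
--             continue
--         most_common = Counter(coset).most_common(1)[0][0]
--         key_val = (most_common - 18) % 29
--         key.append(key_val)
--
--     return key
-- ===== SOURCE B (Python) =====
-- from collections import Counter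
--
-- def generate_frequency_key_sub(cipher_indices, key_length):
--     """Generate frequency-based key for SUB — one bucketing pass instead of per-position strided slicing."""
--     buckets = {}
--     if key_length > 0:
--         for j, v in enumerate(cipher_indices):
--             buckets.setdefault(j % key_length, []).append(v)
--     key = []
--     for i in range(key_length):
--         coset = buckets.get(i, [])
--         if not coset:
--             key.append(0)
--         else:
--             key.append((Counter(coset).most_common(1)[0][0] - 18) % 29)
--     return key
-- ===== Notes on version B (the rewrite author's own statement) =====
-- stated objective: alternative
-- what changed: Replaces A's per-position strided re-slicing of cipher_indices with a single enumerate pass that buckets each value under its index mod key_length into a dict, followed by one reduction pass over positions.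
import Mathlib
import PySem

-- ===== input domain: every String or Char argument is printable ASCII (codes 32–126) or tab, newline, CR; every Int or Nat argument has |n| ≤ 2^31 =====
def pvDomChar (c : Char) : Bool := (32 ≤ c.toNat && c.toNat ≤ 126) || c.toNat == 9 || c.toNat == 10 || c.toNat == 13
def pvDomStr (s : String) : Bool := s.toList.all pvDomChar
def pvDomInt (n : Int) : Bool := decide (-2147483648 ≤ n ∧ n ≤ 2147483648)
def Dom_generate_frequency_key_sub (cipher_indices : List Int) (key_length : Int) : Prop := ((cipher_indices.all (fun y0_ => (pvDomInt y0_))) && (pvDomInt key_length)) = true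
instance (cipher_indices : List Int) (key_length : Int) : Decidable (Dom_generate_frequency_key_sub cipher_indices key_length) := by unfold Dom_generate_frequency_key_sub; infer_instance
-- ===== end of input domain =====

-- B replaces A's per-position strided re-slicing with one dict-bucketing pass over enumerate plus a reduction pass (alternative decomposition, same cost).

-- shared helper: Counter(xs).most_common(1)[0][0] — the first key of maximal count in
-- first-occurrence order (PySem.List.max? returns the FIRST extremal element); both
-- Pythons call exactly this expression. The .getD (0, 0) default is never used: both
-- ports call pvMostCommon only on a nonempty list, where max? is some.
def pvMostCommon (xs : List Int) : Int :=
  ((PySem.List.max? (PySem.Dict.counter xs).items (fun kv => kv.2)).getD (0, 0)).1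

-- ===== PORT A =====
def generate_frequency_key_sub (cipher_indices : List Int) (key_length : Int) : List Int :=
  (PySem.List.pyRange 0 key_length 1).foldl (fun key i =>
    -- coset = [cipher_indices[j] for j in range(i, len(cipher_indices), key_length)]
    -- every j produced by the range is a valid index, so pyGetD is exact here
    let coset := (PySem.List.pyRange i (PySem.List.len cipher_indices) key_length).map
      (fun j => PySem.List.pyGetD cipher_indices j 0)
    if coset.isEmpty then key ++ [0]
    else key ++ [PySem.Int.mod (pvMostCommon coset - 18) 29]) []

-- ===== PORT B =====
def generate_frequency_key_sub_alt (cipher_indices : List Int) (key_length : Int) : List Int :=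
  let buckets : PySem.Dict Int (List Int) :=
    if 0 < key_length then
      (PySem.List.enumerate cipher_indices 0).foldl
        (fun d p => d.modify (PySem.Int.mod p.1 key_length) [] (fun b => b ++ [p.2]))
        PySem.Dict.empty
    else PySem.Dict.empty
  (PySem.List.pyRange 0 key_length 1).foldl (fun key i =>
    let coset := buckets.getD i []
    if coset.isEmpty then key ++ [0]
    else key ++ [PySem.Int.mod (pvMostCommon coset - 18) 29]) []

-- ===== PRECONDITION & SPEC =====
def Spec_generate_frequency_key_sub (cipher_indices : List Int) (key_length : Int) (out : List Int) : Prop := out = generate_frequency_key_sub_alt cipher_indices key_length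
instance (cipher_indices : List Int) (key_length : Int) (out : List Int) : Decidable (Spec_generate_frequency_key_sub cipher_indices key_length out) := by unfold Spec_generate_frequency_key_sub; infer_instance

-- ===== CLAIM (what is proved, stated in full; the proofs are below) =====
def Claim_equal_generate_frequency_key_sub : Prop := ∀ (cipher_indices : List Int) (key_length : Int), Dom_generate_frequency_key_sub cipher_indices key_length → Spec_generate_frequency_key_sub cipher_indices key_length (generate_frequency_key_sub cipher_indices key_length)

-- ===== LEMMAS AND PROOFS =====

-- the subsequence of cipher_indices at positions ≡ i (mod k), as a filter of enumerate
def pvCoset (ci : List Int) (k i : Int) : List Int :=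
  ((PySem.List.enumerate ci 0).filter (fun p => PySem.Int.mod p.1 k == i)).map (fun p => p.2)

-- snoc form of a positive-step range: range(i, n+1, k) gains n exactly when n % k = i
theorem pvStrideSnoc (i k : Int) (n : Nat) (h0 : 0 ≤ i) (hik : i < k) (hk : 0 < k) :
    PySem.List.pyRange i ((n : Int) + 1) k =
      PySem.List.pyRange i n k ++ (if (n : Int) % k = i then [(n : Int)] else []) := by
  rw [PySem.List.pyRange_of_pos _ _ hk, PySem.List.pyRange_of_pos _ _ hk]
  by_cases hle : i ≤ (n : Int)
  case neg =>
    have e1 : ¬ i < (n : Int) + 1 := by omega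
    have e2 : ¬ i < (n : Int) := by omega
    have e3 : ¬ ((n : Int) % k = i) := by
      rw [Int.emod_eq_of_lt (by omega) (by omega)]; omega
    rw [if_neg e1, if_neg e2, if_neg e3]
    simp
  case pos =>
  obtain ⟨q, r, hqr, hr0, hrk, hq0⟩ :
      ∃ q r, k * q + r = (n : Int) - i ∧ 0 ≤ r ∧ r < k ∧ 0 ≤ q :=
    ⟨((n : Int) - i) / k, ((n : Int) - i) % k, Int.mul_ediv_add_emod _ _,
      Int.emod_nonneg _ (by omega), Int.emod_lt_of_pos _ hk,
      Int.ediv_nonneg (by omega) (le_of_lt hk)⟩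
  have hq1k : (q + 1) * k = k * q + k := by ring
  have hqkc : q * k = k * q := mul_comm q k
  have hc1 : ((n : Int) + 1 - i + k - 1) / k = q + 1 := by
    rw [show (n : Int) + 1 - i + k - 1 = r + (q + 1) * k by omega,
      Int.add_mul_ediv_right _ _ (by omega : k ≠ 0),
      Int.ediv_eq_zero_of_lt hr0 hrk, zero_add]
  have hcond : ((n : Int) % k = i) ↔ r = 0 := by
    constructor
    · intro h
      have h2 := Int.emod_eq_emod_iff_emod_sub_eq_zero.mp
        (show (n : Int) % k = i % k by rw [h, Int.emod_eq_of_lt h0 hik])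
      rw [show (n : Int) - i = r + k * q by omega,
        Int.add_mul_emod_self_left, Int.emod_eq_of_lt hr0 hrk] at h2
      exact h2
    · intro h
      rw [show (n : Int) = i + k * q by omega,
        Int.add_mul_emod_self_left, Int.emod_eq_of_lt h0 hik]
  by_cases hrz : r = 0
  · rw [if_pos (hcond.mpr hrz), if_pos (by omega : i < (n : Int) + 1), hc1]
    have hc0 : (if i < (n : Int) then (((n : Int) - i + k - 1) / k).toNat else 0) = q.toNat := by
      by_cases hlt : i < (n : Int)
      · rw [if_pos hlt]
        have hq1 : 1 ≤ q := by
          by_contra hcon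
          have hq0' : q = 0 := by omega
          rw [hq0', mul_zero] at hqr
          omega
        rw [show (n : Int) - i + k - 1 = (k - 1) + q * k by omega,
          Int.add_mul_ediv_right _ _ (by omega : k ≠ 0),
          Int.ediv_eq_zero_of_lt (by omega) (by omega), zero_add]
      · rw [if_neg hlt]
        have hq0' : q = 0 := by
          by_contra hcon
          have h1q : 1 ≤ q := by omega
          have : k ≤ k * q := le_mul_of_one_le_right (le_of_lt hk) h1q
          omega
        rw [hq0']
        rfl
    rw [hc0, show (q + 1).toNat = q.toNat + 1 by omega, List.range_succ, List.map_append]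
    congr 1
    simp only [List.map_cons, List.map_nil]
    congr 2
    rw [Int.toNat_of_nonneg hq0]
    omega
  · have hkq0 : 0 ≤ k * q := mul_nonneg (le_of_lt hk) hq0
    have hlt : i < (n : Int) := by omega
    rw [if_neg (fun h => hrz (hcond.mp h)), List.append_nil,
      if_pos (by omega : i < (n : Int) + 1), if_pos hlt, hc1]
    rw [show (n : Int) - i + k - 1 = (r - 1) + (q + 1) * k by omega,
      Int.add_mul_ediv_right _ _ (by omega : k ≠ 0),
      Int.ediv_eq_zero_of_lt (by omega) (by omega), zero_add]


-- A's strided coset equals the filter-of-enumerate characterisation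
theorem pvCosetA (ci : List Int) (k i : Int) (h0 : 0 ≤ i) (hik : i < k) (hk : 0 < k) :
    (PySem.List.pyRange i (PySem.List.len ci) k).map (fun j => PySem.List.pyGetD ci j 0) =
      pvCoset ci k i := by
  induction ci using List.reverseRecOn with
  | nil =>
    rw [PySem.List.pyRange_of_pos _ _ hk]
    simp [pvCoset, PySem.List.enumerate_nil]
    intro h
    omega
  | append_singleton ci x ih =>
    have hlen : PySem.List.len (ci ++ [x]) = (ci.length : Int) + 1 := by
      simp [PySem.List.len_eq]
    rw [hlen, pvStrideSnoc i k ci.length h0 hik hk, List.map_append]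
    have h1 : (PySem.List.pyRange i (ci.length) k).map
        (fun j => PySem.List.pyGetD (ci ++ [x]) j 0) =
        (PySem.List.pyRange i (ci.length) k).map (fun j => PySem.List.pyGetD ci j 0) := by
      apply List.map_congr_left
      intro j hj
      rcases (PySem.List.mem_pyRange_iff_of_pos hk j).mp hj with ⟨hji, hjn, _⟩
      have hj0 : 0 ≤ j := by omega
      have hjl : j < ((ci.length : Int)) := by omega
      have hjl' : j < (((ci ++ [x]).length : Int)) := by simp; omega
      rw [PySem.List.pyGetD_eq_getElem _ 0 hj0 hjl', PySem.List.pyGetD_eq_getElem _ 0 hj0 hjl]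
      exact List.getElem_append_left (by omega) 
    have h2 : (if ((ci.length : Int)) % k = i then [((ci.length : Int))] else []).map
        (fun j => PySem.List.pyGetD (ci ++ [x]) j 0) =
        (if ((ci.length : Int)) % k = i then [x] else []) := by
      split_ifs with h
      · simp only [List.map_cons, List.map_nil]
        congr 1
        have hl : ((ci.length : Int)) < (((ci ++ [x]).length : Int)) := by simp
        rw [PySem.List.pyGetD_eq_getElem _ 0 (by omega) hl]
        simp
      · rfl
    rw [h1, h2]
    rw [PySem.List.len_eq] at ih
    rw [ih]
    unfold pvCoset
    rw [PySem.List.enumerate_append, List.filter_append, List.map_append]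
    congr 1
    simp only [PySem.List.enumerate_nil, PySem.List.enumerate_cons, zero_add,
      List.filter_cons, List.filter_nil, PySem.Int.mod_eq_emod_of_pos hk]
    by_cases h : ((ci.length : Int)) % k = i
    · simp [h]
    · simp [h]


-- B's bucket equals the same characterisation
theorem pvCosetB (ci : List Int) (k i : Int) (_hk : 0 < k) :
    ((PySem.List.enumerate ci 0).foldl
        (fun d p => d.modify (PySem.Int.mod p.1 k) [] (fun b => b ++ [p.2]))
        PySem.Dict.empty).getD i [] = pvCoset ci k i := by
  have h1 : ((PySem.List.enumerate ci 0).map (fun p => (PySem.Int.mod p.1 k, p.2))).foldl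
        (fun d p => d.modify p.1 [] (fun b => b ++ [p.2])) PySem.Dict.empty
      = (PySem.List.enumerate ci 0).foldl
        (fun d p => d.modify (PySem.Int.mod p.1 k) [] (fun b => b ++ [p.2])) PySem.Dict.empty :=
    List.foldl_map
  rw [← h1, PySem.Dict.getD_foldl_modify_append, pvCoset, List.filter_map, List.map_map]
  simp [Function.comp_def]


-- ===== VERDICT (by name: the statement is the Claim_ definition above) =====
theorem generate_frequency_key_sub_spec : Claim_equal_generate_frequency_key_sub := by
  intro ci kl _
  unfold Spec_generate_frequency_key_sub generate_frequency_key_sub generate_frequency_key_sub_alt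
  by_cases hk : 0 < kl
  · rw [if_pos hk]
    refine PySem.List.foldl_congr_mem _ _ _ _ (fun acc i hi => ?_)
    rcases (PySem.List.mem_pyRange_one).1 hi with ⟨h0, hik⟩
    rw [pvCosetA ci kl i h0 hik hk, pvCosetB ci kl i hk]
  · rw [PySem.List.pyRange_one_eq_nil (by omega)]
    simp
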